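-- pv_equiv track=rewrite | github.com/open-AIMS/PyEwE | src/decom_py/EwEScenarioInterace.py | extract_integer
-- ===== SOURCE A (Python) =====
-- def extract_integer(param_name: str) -> int:
--     in_underscores = False
--     out = ""
--     for char in param_name:
--         if char == "_":
--             if in_underscores and out:
--                 break
--             in_underscores = True
--             out = ""
--         elif char.isdigit() and in_underscores:
--             out += char
--         elif in_underscores and out:
--             break
--     return int(out)
-- ===== SOURCE B (Python) =====
-- def extract_integer(param_name: str) -> int:
--     # find the first underscore, skip to the first digit after it,
--     # take the maximal digit run, parse it (int('') raises like A when absent)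
--     i = param_name.find('_')
--     if i == -1:
--         return int('')
--     rest = param_name[i + 1:]
--     while rest and not rest[0].isdigit():
--         rest = rest[1:]
--     digits = ''
--     while rest and rest[0].isdigit():
--         digits += rest[0]
--         rest = rest[1:]
--     return int(digits)
-- ===== Notes on version B (the rewrite author's own statement) =====
-- stated objective: simpler
-- what changed: Replaces A's flag-based state machine (in_underscores/out with break conditions) by a direct three-phase parse: find the first underscore, skip non-digits, take the maximal digit run, then int() it.
-- outside the precondition, e.g. on extract_integer(''): A raises ValueError, B raises ValueError
import Mathlib
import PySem

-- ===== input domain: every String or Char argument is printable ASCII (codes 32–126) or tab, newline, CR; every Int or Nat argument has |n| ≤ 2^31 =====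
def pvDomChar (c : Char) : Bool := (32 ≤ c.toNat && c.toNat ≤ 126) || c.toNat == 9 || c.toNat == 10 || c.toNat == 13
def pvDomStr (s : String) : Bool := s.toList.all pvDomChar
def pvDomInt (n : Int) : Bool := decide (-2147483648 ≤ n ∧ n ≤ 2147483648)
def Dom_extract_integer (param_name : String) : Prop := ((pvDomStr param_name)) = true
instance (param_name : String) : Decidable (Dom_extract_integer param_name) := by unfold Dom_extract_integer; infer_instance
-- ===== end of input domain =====

-- B replaces A's flag state machine by find-underscore / skip-non-digits / take-digits; same value wherever A returns.

-- ===== PORT A =====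
-- A's loop: state (in_underscores, out); returning the accumulated `out` models `break`.
def pvLoopA : List Char → Bool → List Char → List Char
  | [], _, out => out
  | c :: rest, inU, out =>
    if c = '_' then
      if inU && !out.isEmpty then out
      else pvLoopA rest true []
    else if c.isDigit && inU then pvLoopA rest inU (out ++ [c])
    else if inU && !out.isEmpty then out
    else pvLoopA rest inU out

-- int(out): PySem.Int.ofStr?; none (Python ValueError on empty `out`) is excluded by Pre_.
def extract_integer (param_name : String) : Int :=
  (PySem.Int.ofStr? (String.ofList (pvLoopA param_name.toList false []))).getD 0

-- ===== PORT B =====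
-- `while rest and not rest[0].isdigit(): rest = rest[1:]`
def pvSkipB : List Char → List Char
  | [] => []
  | c :: rest => if !c.isDigit then pvSkipB rest else c :: rest

-- `while rest and rest[0].isdigit(): digits += rest[0]; rest = rest[1:]`
def pvTakeB : List Char → List Char
  | [] => []
  | c :: rest => if c.isDigit then c :: pvTakeB rest else []

def extract_integer_alt (param_name : String) : Int :=
  -- param_name.find('_') == -1 test, and param_name[i+1:], rendered on the char list
  if param_name.toList.contains '_' then
    let rest := (param_name.toList.dropWhile (· ≠ '_')).tail
    (PySem.Int.ofStr? (String.ofList (pvTakeB (pvSkipB rest)))).getD 0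
  else
    (PySem.Int.ofStr? "").getD 0   -- int('') : ValueError, excluded by Pre_

-- ===== PRECONDITION & SPEC =====
-- Pre_ excludes exactly the inputs where Python A raises ValueError (int('')): those with
-- no underscore, or no digit after the first underscore.
def Pre_extract_integer (param_name : String) : Prop :=
  param_name.toList.contains '_' = true ∧
  ((param_name.toList.dropWhile (· ≠ '_')).tail.any (·.isDigit)) = true

instance (param_name : String) : Decidable (Pre_extract_integer param_name) := by
  unfold Pre_extract_integer; infer_instance

def pvWitness_extract_integer : String := "alpha_12b"

def Spec_extract_integer (param_name : String) (out : Int) : Prop := out = extract_integer_alt param_name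
instance (param_name : String) (out : Int) : Decidable (Spec_extract_integer param_name out) := by unfold Spec_extract_integer; infer_instance

-- ===== CLAIM (what is proved, stated in full; the proofs are below) =====
def Claim_equal_extract_integer : Prop := ∀ (param_name : String), Dom_extract_integer param_name → Pre_extract_integer param_name → Spec_extract_integer param_name (extract_integer param_name)

-- ===== LEMMAS AND PROOFS =====

-- once digits have accumulated (out ≠ []), A's loop appends exactly the maximal digit run
theorem pvLoopA_some (l : List Char) (out : List Char) (h : out ≠ []) :
    pvLoopA l true out = out ++ pvTakeB l := by
  induction l generalizing out with
  | nil => simp [pvLoopA, pvTakeB]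
  | cons c rest ih =>
    simp only [pvLoopA, pvTakeB]
    have hout : out.isEmpty = false := by simpa [List.isEmpty_iff] using h
    by_cases hc : c = '_'
    · subst hc; simp [hout]
    · simp only [if_neg hc, hout]
      by_cases hd : c.isDigit
      · simp [hd, ih (out ++ [c]) (by simp)]
      · simp [hd]

-- after the first underscore with nothing accumulated, A's loop = skip-then-take
theorem pvLoopA_after (l : List Char) :
    pvLoopA l true [] = pvTakeB (pvSkipB l) := by
  induction l with
  | nil => simp [pvLoopA, pvSkipB, pvTakeB]
  | cons c rest ih =>
    simp only [pvLoopA, pvSkipB]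
    by_cases hc : c = '_'
    · subst hc
      have : ¬ ('_' : Char).isDigit := by decide
      simp [this, ih]
    · simp only [if_neg hc]
      by_cases hd : c.isDigit
      · simp [hd, pvTakeB, pvLoopA_some rest [c] (by simp)]
      · simp [hd, ih]

-- main characterisation of A's loop when an underscore is present
theorem pvLoopA_main (l : List Char) (h : '_' ∈ l) :
    pvLoopA l false [] = pvTakeB (pvSkipB ((l.dropWhile (· ≠ '_')).tail)) := by
  induction l with
  | nil => cases h
  | cons c rest ih =>
    by_cases hc : c = '_'
    · subst hc
      simp [pvLoopA, List.dropWhile, pvLoopA_after]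
    · have hr : '_' ∈ rest := by cases h with
        | head => exact absurd rfl hc
        | tail _ hm => exact hm
      simp only [pvLoopA, if_neg hc]
      by_cases hd : c.isDigit
      · simp [hd, hc, ih hr]
      · simp [hd, hc, ih hr]

-- ===== VERDICT (by name: the statement is the Claim_ definition above) =====
theorem extract_integer_spec : Claim_equal_extract_integer := by
  intro s _ hpre
  unfold Spec_extract_integer extract_integer extract_integer_alt
  have hu : s.toList.contains '_' = true := hpre.1
  rw [if_pos hu]
  have hmem : '_' ∈ s.toList := by simpa using hu
  rw [pvLoopA_main s.toList hmem]
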